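-- pv_equiv track=rewrite | github.com/kashyapvekariya1905/CP | 2597.py | beautifulSubsets
-- ===== SOURCE A (Python) =====
-- def beautifulSubsets(nums, k):
--     def backtrack(start, current):
--         if current:
--             result[0] += 1
--
--         for i in range(start, len(nums)):
--             if not current or all(abs(nums[i] - num) != k for num in current):
--                 current.append(nums[i])
--                 backtrack(i + 1, current)
--                 current.pop()
--
--     nums.sort()
--     result = [0]
--     backtrack(0, [])
--     return result[0]
-- ===== SOURCE B (Python) =====
-- def beautifulSubsets(nums, k):
--     if k < 0:
--         return 2 ** len(nums) - 1
--     cnt = {}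
--     for x in nums:
--         cnt[x] = cnt.get(x, 0) + 1
--     if k == 0:
--         total = 1
--         for c in cnt.values():
--             total *= c + 1
--         return total - 1
--     groups = {}
--     for v in sorted(cnt):
--         groups[v % k] = groups.get(v % k, []) + [v]
--     total = 1
--     for gv in groups.values():
--         skip, take, prev = 1, 0, None
--         for v in gv:
--             w = 2 ** cnt[v] - 1
--             if prev is not None and v - prev == k:
--                 skip, take = skip + take, skip * w
--             else:
--                 skip, take = skip + take, (skip + take) * w
--             prev = v
--         total *= skip + take
--     return total - 1
-- ===== Notes on version B (the rewrite author's own statement) =====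
-- stated objective: faster
-- what changed: Replaces the exponential backtracking enumeration of all valid subsets by counting: tally value multiplicities, group distinct values by residue mod k, run a Fibonacci-style skip/take DP over each chain of values k apart, and multiply the chain counts (with closed forms for k=0 and k<0).
import Mathlib
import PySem

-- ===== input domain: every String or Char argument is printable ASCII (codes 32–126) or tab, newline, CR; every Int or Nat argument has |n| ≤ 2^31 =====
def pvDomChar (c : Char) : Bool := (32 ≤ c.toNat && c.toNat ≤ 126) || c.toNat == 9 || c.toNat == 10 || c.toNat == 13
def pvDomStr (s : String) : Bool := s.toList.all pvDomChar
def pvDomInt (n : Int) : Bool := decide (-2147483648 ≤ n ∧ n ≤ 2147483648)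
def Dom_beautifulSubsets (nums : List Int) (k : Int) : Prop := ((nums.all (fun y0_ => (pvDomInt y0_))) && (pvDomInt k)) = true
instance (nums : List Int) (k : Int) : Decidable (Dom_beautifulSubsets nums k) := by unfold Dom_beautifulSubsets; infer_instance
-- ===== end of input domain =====

-- B replaces A's exponential backtracking subset enumeration by residue-mod-k grouping with a
-- Fibonacci-style skip/take DP per chain of values k apart (closed forms for k = 0 and k < 0).
-- Note: A sorts its argument list in place; B does not mutate it. The claim is about the return value.

-- ===== PORT A =====
-- backtrack(start, current): `backA … start current` is the total added to result[0] by one call,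
-- `auxA … current i` the total added by the `for i in range(i, len(nums))` loop.
-- `nums[i]` is read through a bounds proof (i is always in range inside the loop); Python `abs` on int is Int's |·|.
mutual
def backA (nums : List Int) (k : Int) (start : Nat) (current : List Int) : Int :=
  (if current ≠ [] then 1 else 0) + auxA nums k current start
termination_by (nums.length - start, 1)

def auxA (nums : List Int) (k : Int) (current : List Int) (i : Nat) : Int :=
  if h : i < nums.length then
    (if current = [] ∨ current.all (fun num => |nums[i] - num| ≠ k) then
        backA nums k (i + 1) (current ++ [nums[i]])
     else 0)
    + auxA nums k current (i + 1)
  else 0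
termination_by (nums.length - i, 0)
decreasing_by all_goals simp_wf <;> omega
end

def beautifulSubsets (nums : List Int) (k : Int) : Int :=
  backA (PySem.List.sorted nums (fun x => x) false) k 0 []

-- ===== PORT B =====
-- one step of the per-chain skip/take DP (state: skip, take, prev)
def stepB (cnt : PySem.Dict Int Int) (k : Int) (st : Int × Int × Option Int) (v : Int) :
    Int × Int × Option Int :=
  -- w = 2 ** cnt[v] - 1:  cnt[v] is a count, ≥ 1 for every v iterated, so .toNat is exact
  let w : Int := 2 ^ (cnt.getD v 0).toNat - 1
  match st with
  | (skip, take, some p) =>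
    if v - p = k then (skip + take, skip * w, some v)
    else (skip + take, (skip + take) * w, some v)
  | (skip, take, none) => (skip + take, (skip + take) * w, some v)

def beautifulSubsets_alt (nums : List Int) (k : Int) : Int :=
  if k < 0 then 2 ^ nums.length - 1
  else
    let cnt : PySem.Dict Int Int :=
      nums.foldl (fun d x => d.insert x (d.getD x 0 + 1)) PySem.Dict.empty
    if k = 0 then
      (cnt.values.foldl (fun total c => total * (c + 1)) 1) - 1
    else
      let groups : PySem.Dict Int (List Int) :=
        (PySem.List.sorted cnt.keys (fun x => x) false).foldl
          (fun g v => g.insert (PySem.Int.mod v k) ((g.getD (PySem.Int.mod v k) []) ++ [v]))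
          PySem.Dict.empty
      (groups.values.foldl (fun total gv =>
          total * (let st := gv.foldl (stepB cnt k) (1, 0, none); st.1 + st.2.1)) 1) - 1

-- ===== PRECONDITION & SPEC =====
def Spec_beautifulSubsets (nums : List Int) (k : Int) (out : Int) : Prop := out = beautifulSubsets_alt nums k
instance (nums : List Int) (k : Int) (out : Int) : Decidable (Spec_beautifulSubsets nums k out) := by unfold Spec_beautifulSubsets; infer_instance

-- ===== CLAIM (what is proved, stated in full; the proofs are below) =====
def Claim_equal_beautifulSubsets : Prop := ∀ (nums : List Int) (k : Int), Dom_beautifulSubsets nums k → Spec_beautifulSubsets nums k (beautifulSubsets nums k)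


-- ===== LEMMAS AND PROOFS =====

-- The common counting spec: `CGav k L s` counts the sub-multisets t of s that are "good"
-- (no two members at absolute difference k) and avoid conflicts with every pending value in L.
abbrev GoodM (k : Int) (t : Multiset Int) : Prop := ∀ x ∈ t, ∀ y ∈ t.erase x, |x - y| ≠ k
abbrev AvL (k : Int) (L : List Int) (t : Multiset Int) : Prop := ∀ a ∈ L, ∀ y ∈ t, |a - y| ≠ k

def CGav (k : Int) (L : List Int) (s : Multiset Int) : ℕ :=
  Multiset.countP (fun t => GoodM k t ∧ AvL k L t) s.powerset

def CG (k : Int) (s : Multiset Int) : ℕ := CGav k [] s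

def msOf (c : Int → ℕ) (l : List Int) : Multiset Int :=
  (l.map (fun v => Multiset.replicate (c v) v)).sum

lemma goodM_cons (k x : Int) (t : Multiset Int) :
    GoodM k (x ::ₘ t) ↔ (∀ y ∈ t, |x - y| ≠ k) ∧ GoodM k t := by
  constructor
  · intro h
    refine ⟨fun y hy => h x (Multiset.mem_cons_self x t) y
      (by rwa [Multiset.erase_cons_head]), ?_⟩
    intro a ha y hy
    have hmem := h a (Multiset.mem_cons_of_mem ha)
    by_cases hax : x = a
    · subst hax
      exact hmem y (by rw [Multiset.erase_cons_head]; exact Multiset.mem_of_mem_erase hy)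
    · exact hmem y (by rw [Multiset.erase_cons_tail t hax]; exact Multiset.mem_cons_of_mem hy)
  · rintro ⟨h1, h2⟩ a ha y hy
    rcases Multiset.mem_cons.mp ha with rfl | hat
    · rw [Multiset.erase_cons_head] at hy
      exact h1 y hy
    · by_cases hax : x = a
      · subst hax
        rw [Multiset.erase_cons_head] at hy
        exact h1 y hy
      · rw [Multiset.erase_cons_tail t hax] at hy
        rcases Multiset.mem_cons.mp hy with rfl | hyt
        · rw [abs_sub_comm]; exact h1 a hat
        · exact h2 a hat y hyt

lemma cgav_zero (k : Int) (L : List Int) : CGav k L 0 = 1 := by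
  unfold CGav
  rw [Multiset.powerset_zero]
  rw [show ({0} : Multiset (Multiset Int)) = 0 ::ₘ 0 from rfl, Multiset.countP_cons]
  simp [AvL]

lemma cgav_cons (k x : Int) (L : List Int) (s : Multiset Int) :
    CGav k L (x ::ₘ s) =
      CGav k L s + (if ∀ a ∈ L, |a - x| ≠ k then CGav k (x :: L) s else 0) := by
  unfold CGav
  rw [Multiset.powerset_cons, Multiset.countP_add, Multiset.countP_map]
  congr 1
  by_cases hc : ∀ a ∈ L, |a - x| ≠ k
  · rw [if_pos hc, Multiset.countP_eq_card_filter]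
    congr 1
    apply Multiset.filter_congr
    intro t _
    rw [goodM_cons]
    constructor
    · rintro ⟨⟨hxt, hg⟩, hav⟩
      refine ⟨hg, ?_⟩
      intro a ha
      rcases List.mem_cons.mp ha with rfl | haL
      · exact hxt
      · intro y hy; exact hav a haL y (Multiset.mem_cons_of_mem hy)
    · rintro ⟨hg, hav⟩
      refine ⟨⟨fun y hy => hav x List.mem_cons_self y hy, hg⟩, ?_⟩
      intro a haL y hy
      rcases Multiset.mem_cons.mp hy with rfl | hyt
      · exact hc a haL
      · exact hav a (List.mem_cons_of_mem x haL) y hyt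
  · rw [if_neg hc]
    rw [Multiset.card_eq_zero, Multiset.filter_eq_nil]
    intro t _ ⟨_, hav⟩
    exact hc (fun a ha => hav a ha x (Multiset.mem_cons_self x t))

lemma cgav_of_av (k : Int) (L : List Int) (s : Multiset Int)
    (h : ∀ a ∈ L, ∀ y ∈ s, |a - y| ≠ k) : CGav k L s = CG k s := by
  unfold CG CGav
  apply Multiset.countP_congr rfl
  intro t ht
  have hts : t ≤ s := Multiset.mem_powerset.mp ht
  apply propext
  constructor
  · rintro ⟨hg, _⟩; exact ⟨hg, by simp [AvL]⟩
  · rintro ⟨hg, _⟩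
    exact ⟨hg, fun a ha y hy => h a ha y (Multiset.mem_of_le hts hy)⟩

lemma cgav_dup (k v : Int) (L : List Int) (s : Multiset Int) :
    CGav k (v :: v :: L) s = CGav k (v :: L) s := by
  unfold CGav
  apply Multiset.countP_congr rfl
  intro t _
  apply propext
  simp only [AvL, List.forall_mem_cons]
  tauto

lemma cgav_rep (k : Int) (hk : k ≠ 0) (c : ℕ) (v : Int) (L : List Int) (s : Multiset Int) :
    CGav k L (Multiset.replicate c v + s) =
      CGav k L s + (2 ^ c - 1) * (if ∀ a ∈ L, |a - v| ≠ k then CGav k (v :: L) s else 0) := by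
  induction c generalizing L with
  | zero => simp
  | succ c ih =>
    rw [Multiset.replicate_succ, Multiset.cons_add, cgav_cons, ih L]
    by_cases hc : ∀ a ∈ L, |a - v| ≠ k
    · rw [if_pos hc, if_pos hc]
      have hcv : ∀ a ∈ (v :: L), |a - v| ≠ k := by
        intro a ha
        rcases List.mem_cons.mp ha with rfl | h
        · simpa using (Ne.symm hk)
        · exact hc a h
      rw [ih (v :: L), if_pos hcv, cgav_dup]
      obtain ⟨b, hb⟩ : ∃ b, 2 ^ c = b + 1 := ⟨2 ^ c - 1, by have := Nat.one_le_two_pow (n := c); omega⟩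
      rw [pow_succ, hb, Nat.add_sub_cancel,
        show (b + 1) * 2 - 1 = 2 * b + 1 from by omega]
      ring
    · rw [if_neg hc, if_neg hc]
      simp

lemma cgav_skip (k v u : Int) (h : |v - u| = k) (c : ℕ) (L : List Int) (s : Multiset Int) :
    CGav k (v :: L) (Multiset.replicate c u + s) = CGav k (v :: L) s := by
  induction c with
  | zero => simp
  | succ c ih =>
    rw [Multiset.replicate_succ, Multiset.cons_add, cgav_cons, if_neg, add_zero, ih]
    intro hall
    exact hall v List.mem_cons_self h

lemma cg_prod (k : Int) (u : Multiset Int) :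
    ∀ (L : List Int) (s : Multiset Int),
      (∀ x ∈ s, ∀ y ∈ u, |x - y| ≠ k) → (∀ a ∈ L, ∀ x ∈ s, |a - x| ≠ k) →
      CGav k L (s + u) = CG k s * CGav k L u := by
  induction u using Multiset.induction with
  | empty =>
    intro L s _ h2
    rw [add_zero, cgav_zero, cgav_of_av k L s h2, mul_one]
  | cons a u ih =>
    intro L s h1 h2
    rw [Multiset.add_cons, cgav_cons, cgav_cons,
      ih L s (fun x hx y hy => h1 x hx y (Multiset.mem_cons_of_mem hy)) h2]
    by_cases hc : ∀ b ∈ L, |b - a| ≠ k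
    · rw [if_pos hc, if_pos hc,
        ih (a :: L) s (fun x hx y hy => h1 x hx y (Multiset.mem_cons_of_mem hy)) ?_, mul_add]
      intro b hb x hx
      rcases List.mem_cons.mp hb with rfl | hbL
      · rw [abs_sub_comm]; exact h1 x hx b (Multiset.mem_cons_self b u)
      · exact h2 b hbL x hx
    · rw [if_neg hc, if_neg hc]
      simp

lemma mem_msOf {c : Int → ℕ} {l : List Int} {x : Int} (h : x ∈ msOf c l) : x ∈ l := by
  induction l with
  | nil => simp [msOf] at h
  | cons v l ih =>
    rw [msOf, List.map_cons, List.sum_cons] at h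
    rcases Multiset.mem_add.mp h with h | h
    · exact List.mem_cons.mpr (Or.inl (Multiset.eq_of_mem_replicate h))
    · exact List.mem_cons.mpr (Or.inr (ih h))

lemma msOf_append (c : Int → ℕ) (l : List Int) (v : Int) :
    msOf c (l ++ [v]) = msOf c l + Multiset.replicate (c v) v := by
  simp [msOf]

lemma msOf_perm (c : Int → ℕ) {l l' : List Int} (h : l.Perm l') : msOf c l = msOf c l' := by
  exact List.Perm.sum_eq (h.map _)

lemma msOf_flatten (c : Int → ℕ) (L : List (List Int)) :
    msOf c L.flatten = (L.map (msOf c)).sum := by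
  induction L with
  | nil => simp [msOf]
  | cons g L ih =>
    simp only [List.flatten_cons, List.map_cons, List.sum_cons, ← ih, msOf,
      List.map_append, List.sum_append]

-- partitioning a list by key over a complete nodup list of keys is a permutation
lemma flatten_filter_perm {α κ : Type} [BEq κ] [LawfulBEq κ] (key : α → κ) :
    ∀ (R : List κ) (l : List α), R.Nodup → (∀ x ∈ l, key x ∈ R) →
      ((R.map (fun r => l.filter (fun x => key x == r))).flatten).Perm l := by
  intro R
  induction R with
  | nil =>
    intro l _ hcov
    cases l with
    | nil => simp
    | cons x l => exact absurd (hcov x List.mem_cons_self) (List.not_mem_nil)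
  | cons r R ih =>
    intro l hnd hcov
    rw [List.map_cons, List.flatten_cons]
    have hnd' := (List.nodup_cons.mp hnd).2
    have hr : r ∉ R := (List.nodup_cons.mp hnd).1
    set l' := l.filter (fun x => !(key x == r)) with hl'
    have hmapeq : R.map (fun r' => l.filter (fun x => key x == r')) =
        R.map (fun r' => l'.filter (fun x => key x == r')) := by
      apply List.map_congr_left
      intro r' hr'
      rw [hl', List.filter_filter]
      apply List.filter_congr
      intro x _
      rcases h : key x == r' with _ | _
      · simp
      · simp only [Bool.true_and]
        have hx : key x = r' := beq_iff_eq.mp h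
        have hner : key x ≠ r := by
          intro hkr
          have : r' = r := by rw [← hx, hkr]
          exact hr (this ▸ hr')
        simp [hner]
    have hcov' : ∀ x ∈ l', key x ∈ R := by
      intro x hx
      have hxl := List.mem_of_mem_filter hx
      have hne : ¬(key x == r) = true := by
        have := List.of_mem_filter hx
        simpa using this
      rcases List.mem_cons.mp (hcov x hxl) with h | h
      · exact absurd (beq_iff_eq.mpr h) hne
      · exact h
    have step1 : (l.filter (fun x => key x == r) ++
        (R.map (fun r' => l.filter (fun x => key x == r'))).flatten).Perm
          (l.filter (fun x => key x == r) ++ l') := by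
      rw [hmapeq]
      exact List.Perm.append_left _ (ih l' hnd' hcov')
    exact step1.trans (List.filter_append_perm _ l)

lemma msOf_ofList (l : List Int) :
    msOf (fun v => l.count v) (PySem.Set.ofList l) = (l : Multiset Int) := by
  have hperm := flatten_filter_perm (fun x : Int => x) (PySem.Set.ofList l) l
    (PySem.Set.nodup_ofList l) (fun x hx => (PySem.Set.mem_ofList l x).mpr hx)
  have hsum : ∀ (L : List (List Int)),
      Multiset.ofList L.flatten = (L.map Multiset.ofList).sum := by
    intro L
    induction L with
    | nil => simp
    | cons t L ih =>
      rw [List.flatten_cons, List.map_cons, List.sum_cons, ← ih]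
      exact Multiset.coe_add t L.flatten
  rw [← Multiset.coe_eq_coe.mpr hperm, hsum, msOf, List.map_map]
  apply congrArg
  apply List.map_congr_left
  intro r _
  simp only [Function.comp_apply, List.filter_beq, Multiset.coe_replicate]

lemma cg_groups_prod (k : Int) (cf : Int → ℕ) :
    ∀ (gs : List (List Int)),
      List.Pairwise (fun g₁ g₂ => ∀ x ∈ g₁, ∀ y ∈ g₂, |x - y| ≠ k) gs →
      CG k ((gs.map (msOf cf)).sum) = ((gs.map (fun g => CG k (msOf cf g))).prod) := by
  intro gs
  induction gs with
  | nil => intro _; simp [CG, cgav_zero]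
  | cons g gs ih =>
    intro hp
    rw [List.map_cons, List.sum_cons, List.map_cons, List.prod_cons]
    have hcross : ∀ x ∈ msOf cf g, ∀ y ∈ (gs.map (msOf cf)).sum, |x - y| ≠ k := by
      intro x hx y hy
      have hxg := mem_msOf hx
      have : ∃ g' ∈ gs, y ∈ msOf cf g' := by
        clear hp ih
        induction gs with
        | nil => simp at hy
        | cons h t iht =>
          rw [List.map_cons, List.sum_cons] at hy
          rcases Multiset.mem_add.mp hy with h1 | h1
          · exact ⟨h, List.mem_cons_self, h1⟩
          · obtain ⟨g', hg', hyg'⟩ := iht h1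
            exact ⟨g', List.mem_cons_of_mem h hg', hyg'⟩
      obtain ⟨g', hg', hyg'⟩ := this
      exact (List.pairwise_cons.mp hp).1 g' hg' x hxg y (mem_msOf hyg')
    have hstep := cg_prod k ((gs.map (msOf cf)).sum) [] (msOf cf g) hcross (by simp)
    have hsum2 : CGav k [] ((gs.map (msOf cf)).sum) =
        (gs.map (fun g => CG k (msOf cf g))).prod := ih (List.pairwise_cons.mp hp).2
    rw [CG, hstep, hsum2]

-- ===== A side: the backtracking count equals the good-subset count =====

def S (k : Int) (c : List Int) : List Int → ℕ
  | [] => 1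
  | x :: l => S k c l + (if c = [] ∨ c.all (fun num => |x - num| ≠ k) then S k (c ++ [x]) l else 0)

lemma auxA_eq (nums : List Int) (k : Int) :
    ∀ (n i : Nat) (cur : List Int), nums.length - i ≤ n →
      auxA nums k cur i = (S k cur (nums.drop i) : ℤ) - 1 := by
  intro n
  induction n with
  | zero =>
    intro i cur hn
    rw [auxA, dif_neg (by omega), List.drop_eq_nil_of_le (by omega), S]
    simp
  | succ n ih =>
    intro i cur hn
    rw [auxA]
    by_cases h : i < nums.length
    · rw [dif_pos h, List.drop_eq_getElem_cons h, S, ih (i + 1) cur (by omega)]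
      by_cases hok : cur = [] ∨ cur.all (fun num => |nums[i] - num| ≠ k) = true
      · rw [if_pos hok, if_pos hok, backA, if_pos (by simp),
          ih (i + 1) (cur ++ [nums[i]]) (by omega)]
        push_cast
        ring
      · rw [if_neg hok, if_neg hok]
        push_cast
        ring
    · rw [dif_neg h, List.drop_eq_nil_of_le (by omega), S]
      simp

lemma S_eq_countP (k : Int) :
    ∀ (l c : List Int), List.Pairwise (fun a b => |a - b| ≠ k) c →
      S k c l = List.countP
        (fun t => decide (List.Pairwise (fun a b => |a - b| ≠ k) (c ++ t))) l.sublists' := by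
  intro l
  induction l with
  | nil =>
    intro c hc
    rw [S, List.sublists'_nil]
    simp [hc]
  | cons x l ih =>
    intro c hc
    rw [S, List.sublists'_cons, List.countP_append, List.countP_map, ← ih c hc]
    by_cases hok : c = [] ∨ c.all (fun num => |x - num| ≠ k) = true
    · have hcx : List.Pairwise (fun a b => |a - b| ≠ k) (c ++ [x]) := by
        rw [List.pairwise_append]
        refine ⟨hc, List.pairwise_singleton _ _, ?_⟩
        intro a ha b hb
        rw [List.mem_singleton] at hb
        subst hb
        rcases hok with rfl | hall
        · exact absurd ha (List.not_mem_nil)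
        · rw [abs_sub_comm]
          simpa using (List.all_eq_true.mp hall) a ha
      rw [if_pos hok, ih (c ++ [x]) hcx]
      congr 1
      apply List.countP_congr
      intro t _
      simp only [Function.comp_apply]
      rw [← List.append_cons c x t]
    · rw [if_neg hok]
      have hnx : ¬ List.Pairwise (fun a b => |a - b| ≠ k) (c ++ [x]) := by
        intro hp
        push_neg at hok
        obtain ⟨hcne, hall⟩ := hok
        simp only [ne_eq, List.all_eq_true, decide_eq_true_eq] at hall
        push_neg at hall
        obtain ⟨num, hnum, hbad⟩ := hall
        have hk : |x - num| = k := hbad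
        have := (List.pairwise_append.mp hp).2.2 num hnum x (List.mem_singleton_self x)
        rw [abs_sub_comm] at this
        exact this hk
      have hzero : List.countP
          ((fun t => decide (List.Pairwise (fun a b => |a - b| ≠ k) (c ++ t))) ∘ (x :: ·))
          l.sublists' = 0 := by
        rw [List.countP_eq_zero]
        intro t _
        simp only [Function.comp_apply, decide_eq_true_eq]
        intro hp
        apply hnx
        refine hp.sublist ?_
        exact ((List.nil_sublist t).cons₂ x).append_left c
      rw [hzero, add_zero]

lemma goodM_coe (k : Int) (t : List Int) :
    GoodM k (t : Multiset Int) ↔ List.Pairwise (fun a b => |a - b| ≠ k) t := by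
  induction t with
  | nil => simp [GoodM]
  | cons x t ih =>
    rw [← Multiset.cons_coe, goodM_cons, List.pairwise_cons, ih]
    constructor
    · rintro ⟨h1, h2⟩
      exact ⟨fun y hy => h1 y (by exact_mod_cast hy), h2⟩
    · rintro ⟨h1, h2⟩
      exact ⟨fun y hy => h1 y (by exact_mod_cast hy), h2⟩

lemma cg_coe (k : Int) (l : List Int) :
    CG k (l : Multiset Int) =
      List.countP (fun t => decide (List.Pairwise (fun a b => |a - b| ≠ k) t)) l.sublists' := by
  rw [CG, CGav, Multiset.powerset_coe', Multiset.coe_countP, List.countP_map]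
  apply List.countP_congr
  intro t _
  simp only [Function.comp_apply, decide_eq_true_eq]
  rw [goodM_coe]
  simp [AvL]

lemma S_nil_eq_cg (k : Int) (l : List Int) : S k [] l = CG k (l : Multiset Int) := by
  rw [S_eq_countP k l [] List.Pairwise.nil, cg_coe]
  apply List.countP_congr
  intro t _
  simp only [decide_eq_true_eq]
  rw [List.nil_append]

lemma A_eq (nums : List Int) (k : Int) :
    beautifulSubsets nums k = (CG k (nums : Multiset Int) : ℤ) - 1 := by
  rw [beautifulSubsets, backA, if_neg (by simp),
    auxA_eq _ k (PySem.List.sorted nums (fun x => x) false).length 0 [] (by omega),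
    List.drop_zero, zero_add, S_nil_eq_cg,
    show ((PySem.List.sorted nums (fun x => x) false : List Int) : Multiset Int)
        = (nums : Multiset Int) from
      Multiset.coe_eq_coe.mpr (PySem.List.sorted_perm nums (fun x => x) false)]

-- ===== B side =====

lemma foldl_mul_int {α : Type} (f : α → ℤ) :
    ∀ (l : List α) (a : ℤ), l.foldl (fun t c => t * f c) a = a * (l.map f).prod := by
  intro l
  induction l with
  | nil => intro a; simp
  | cons x l ih =>
    intro a
    rw [List.foldl_cons, ih, List.map_cons, List.prod_cons]
    ring

lemma cg_all_of_neg (k : Int) (hk : k < 0) (l : List Int) :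
    CG k (l : Multiset Int) = 2 ^ l.length := by
  rw [CG, CGav, Multiset.countP_eq_card.mpr, Multiset.card_powerset, Multiset.coe_card]
  intro t _
  refine ⟨?_, by simp [AvL]⟩
  intro x _ y _
  have := abs_nonneg (x - y)
  omega

lemma cg_rep_zero (v : Int) (c : ℕ) : CG 0 (Multiset.replicate c v) = c + 1 := by
  induction c with
  | zero => simp [CG, Multiset.replicate_zero, cgav_zero]
  | succ c ih =>
    rw [Multiset.replicate_succ, CG, cgav_cons, if_pos (by intro a ha; exact absurd ha (List.not_mem_nil))]
    have hskip : CGav 0 [v] (Multiset.replicate c v) = 1 := by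
      have := cgav_skip 0 v v (by simp) c [] (0 : Multiset Int)
      rwa [add_zero, cgav_zero] at this
    rw [hskip, ← CG, ih]

lemma chainDP (k : Int) (hk : 0 < k) (cnt : PySem.Dict Int Int) (cf : Int → ℕ)
    (hcf : ∀ v, (cnt.getD v 0).toNat = cf v) :
    ∀ (rest done : List Int) (skip take : ℤ) (prev : Option Int),
      List.Pairwise (· < ·) (done ++ rest) →
      (∀ a ∈ done ++ rest, ∀ b ∈ done ++ rest, k ∣ a - b) →
      prev = done.getLast? →
      skip + take = (CG k (msOf cf done) : ℤ) →
      skip = (CG k (msOf cf done.dropLast) : ℤ) →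
      (let st := rest.foldl (stepB cnt k) (skip, take, prev);
       st.1 + st.2.1) = (CG k (msOf cf (done ++ rest)) : ℤ) := by
  intro rest
  induction rest with
  | nil =>
    intro done skip take prev _ _ _ hst _
    simpa using hst
  | cons v rest ih =>
    intro done skip take prev hsort hdvd hprev hst hskip
    have hvd : ∀ u ∈ done, u < v := by
      intro u hu
      exact (List.pairwise_append.mp hsort).2.2 u hu v List.mem_cons_self
    obtain ⟨b, hb⟩ : ∃ b : ℕ, 2 ^ cf v = b + 1 :=
      ⟨2 ^ cf v - 1, by have := Nat.one_le_two_pow (n := cf v); omega⟩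
    -- the new block added when v is processed
    have hrep : (CG k (msOf cf (done ++ [v])) : ℤ)
        = (CG k (msOf cf done) : ℤ)
          + (((2 ^ cf v : ℕ) : ℤ) - 1) * (CGav k [v] (msOf cf done) : ℤ) := by
      rw [CG, msOf_append, add_comm (msOf cf done),
        cgav_rep k (by omega) (cf v) v [] (msOf cf done),
        if_pos (by intro a ha; exact absurd ha (List.not_mem_nil)), hb]
      push_cast
      rw [CG]
      ring
    -- w in stepB is 2 ^ cf v - 1
    have hw : (2 : ℤ) ^ (cnt.getD v 0).toNat - 1 = ((2 ^ cf v : ℕ) : ℤ) - 1 := by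
      rw [hcf v]; push_cast; ring
    -- structural facts about done ++ v :: rest
    have happ : done ++ v :: rest = (done ++ [v]) ++ rest := by simp
    have hsort' : List.Pairwise (· < ·) ((done ++ [v]) ++ rest) := by rwa [← happ]
    have hdvd' : ∀ a ∈ (done ++ [v]) ++ rest, ∀ b ∈ (done ++ [v]) ++ rest, k ∣ a - b := by
      rw [← happ]; exact hdvd
    have hlast' : (some v : Option Int) = ((done ++ [v]) : List Int).getLast? :=
      List.getLast?_concat.symm
    have hdrop' : ((done ++ [v]) : List Int).dropLast = done := List.dropLast_concat
    -- the goal after one fold step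
    rw [List.foldl_cons, happ]
    -- case analysis on prev / conflict
    rcases hpe : prev with _ | p
    · -- prev = none: done = []
      have hdone : done = [] := List.getLast?_eq_none_iff.mp (hpe ▸ hprev).symm
      subst hdone
      have hD : msOf cf ([] : List Int) = 0 := by simp [msOf]
      have hCG0 : (CG k (msOf cf ([] : List Int)) : ℤ) = 1 := by
        rw [hD, CG, cgav_zero, Nat.cast_one]
      have hX : (CGav k [v] (msOf cf ([] : List Int)) : ℤ) = skip + take := by
        rw [hD, cgav_zero, Nat.cast_one, hst, hCG0]
      have hstep : stepB cnt k (skip, take, none) v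
          = (skip + take, (skip + take) * ((2 : ℤ) ^ (cnt.getD v 0).toNat - 1), some v) := rfl
      rw [hstep]
      refine ih ([] ++ [v]) _ _ _ hsort' hdvd' hlast' ?_ ?_
      · rw [hrep, hX, ← hst, hw]
        ring
      · rw [hdrop', hst]
    · -- prev = some p: done = d0 ++ [p]
      obtain ⟨d0, hd0⟩ : ∃ d0, done = d0 ++ [p] := by
        obtain ⟨d0, hd0⟩ := List.getLast?_eq_some_iff.mp (hpe ▸ hprev).symm
        exact ⟨d0, hd0⟩
      have hpdone : p ∈ done := by rw [hd0]; simp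
      have hpv : p < v := hvd p hpdone
      by_cases hcf' : v - p = k
      · -- conflict: the take branch excludes p's block
        have hX : (CGav k [v] (msOf cf done) : ℤ) = skip := by
          rw [hd0, msOf_append, add_comm (msOf cf d0),
            cgav_skip k v p (by rw [hcf']; exact abs_of_pos hk) (cf p) [] (msOf cf d0),
            cgav_of_av k [v] (msOf cf d0) ?_, hskip, hd0, List.dropLast_concat]
          intro a ha y hy
          rcases List.mem_singleton.mp ha
          have hyd0 : y ∈ d0 := mem_msOf hy
          have hyp : y < p := by
            have hps : List.Pairwise (· < ·) done := (List.pairwise_append.mp hsort).1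
            rw [hd0, List.pairwise_append] at hps
            exact hps.2.2 y hyd0 p (List.mem_singleton_self p)
          have : v - y > k := by omega
          have habs : |v - y| = v - y := abs_of_pos (by omega)
          omega
        have hstep : stepB cnt k (skip, take, some p) v
            = (skip + take, skip * ((2 : ℤ) ^ (cnt.getD v 0).toNat - 1), some v) := by
          simp [stepB, hcf']
        rw [hstep]
        refine ih (done ++ [v]) _ _ _ hsort' hdvd' hlast' ?_ ?_
        · rw [hrep, hX, ← hst, hw]
          ring
        · rw [hdrop', hst]
      · -- no conflict: nothing in done conflicts with v
        have hX : (CGav k [v] (msOf cf done) : ℤ) = skip + take := by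
          rw [cgav_of_av k [v] (msOf cf done) ?_, hst]
          intro a ha y hy
          rcases List.mem_singleton.mp ha
          have hyd : y ∈ done := mem_msOf hy
          have hyv : y < v := hvd y hyd
          have habs : |v - y| = v - y := abs_of_pos (by omega)
          intro hcon
          -- v - y = k; but then y must be p
          have hyk : v - y = k := by omega
          have hyp : y ≤ p := by
            have hps : List.Pairwise (· < ·) done := (List.pairwise_append.mp hsort).1
            rw [hd0, List.pairwise_append] at hps
            rcases List.mem_append.mp (hd0 ▸ hyd) with h | h
            · exact le_of_lt (hps.2.2 y h p (List.mem_singleton_self p))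
            · rw [List.mem_singleton.mp h]
          have hdvdpy : k ∣ p - y := by
            apply hdvd p (by simp [hpdone]) y (by simp [hyd])
          rcases hdvdpy with ⟨m, hm⟩
          have hm0 : 0 ≤ m := by
            by_contra hneg
            push_neg at hneg
            have : k * m < 0 := mul_neg_of_pos_of_neg hk hneg
            omega
          rcases eq_or_lt_of_le hm0 with hm1 | hm1
          · -- m = 0: y = p, so v - p = k, contradiction
            apply hcf'
            rw [← hm1, mul_zero] at hm
            omega
          · -- m ≥ 1: p - y ≥ k, so v - p ≤ 0, contradiction with p < v
            have h2 : k ≤ k * m := by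
              have := mul_le_mul_of_nonneg_left (by omega : (1 : ℤ) ≤ m) (le_of_lt hk)
              simpa using this
            omega
        have hstep : stepB cnt k (skip, take, some p) v
            = (skip + take, (skip + take) * ((2 : ℤ) ^ (cnt.getD v 0).toNat - 1), some v) := by
          simp [stepB, hcf']
        rw [hstep]
        refine ih (done ++ [v]) _ _ _ hsort' hdvd' hlast' ?_ ?_
        · rw [hrep, hX, ← hst, hw]
          ring
        · rw [hdrop', hst]

lemma group_getD (key : Int → Int) :
    ∀ (l : List Int) (g : PySem.Dict Int (List Int)) (r : Int),
      (l.foldl (fun g v => g.insert (key v) ((g.getD (key v) []) ++ [v])) g).getD r []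
        = g.getD r [] ++ l.filter (fun v => key v == r) := by
  intro l
  induction l with
  | nil => intro g r; simp
  | cons v l ih =>
    intro g r
    rw [List.foldl_cons, ih, PySem.Dict.getD_insert, List.filter_cons]
    by_cases hr : r = key v
    · subst hr
      simp
    · rw [if_neg hr, if_neg (by simpa using Ne.symm hr)]

lemma mod_eq_of_dvd_sub {k x y : Int} (hk : 0 < k) (h : k ∣ x - y) :
    PySem.Int.mod x k = PySem.Int.mod y k := by
  rw [PySem.Int.mod_eq_emod_of_pos hk, PySem.Int.mod_eq_emod_of_pos hk,
    Int.emod_eq_emod_iff_emod_sub_eq_zero]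
  exact Int.emod_eq_zero_of_dvd h

lemma dvd_sub_of_mod_eq {k x y : Int} (hk : 0 < k)
    (h : PySem.Int.mod x k = PySem.Int.mod y k) : k ∣ x - y := by
  rw [PySem.Int.mod_eq_emod_of_pos hk, PySem.Int.mod_eq_emod_of_pos hk] at h
  exact Int.dvd_of_emod_eq_zero (Int.emod_eq_emod_iff_emod_sub_eq_zero.mp h)

lemma B_eq (nums : List Int) (k : Int) :
    beautifulSubsets_alt nums k = (CG k (nums : Multiset Int) : ℤ) - 1 := by
  rw [beautifulSubsets_alt]
  by_cases hneg : k < 0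
  · rw [if_pos hneg, cg_all_of_neg k hneg nums]
    push_cast
    ring
  rw [if_neg hneg, PySem.Dict.foldl_insert_getD_add_one_eq_counter]
  by_cases h0 : k = 0
  · subst h0
    rw [if_pos rfl]
    -- the k = 0 closed form: ∏ (count v + 1) over distinct values
    have hvals : (PySem.Dict.counter nums).values
        = (PySem.Set.ofList nums).map (fun v => ((nums.count v : ℤ))) := by
      rw [PySem.Dict.values_eq_map_keys _ (PySem.Dict.nodup_keys_counter nums) 0,
        PySem.Dict.keys_counter]
      exact List.map_congr_left (fun v _ => PySem.Dict.getD_counter nums v)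
    rw [hvals, foldl_mul_int, one_mul, List.map_map]
    -- identify CG 0 ↑nums with the product
    have hgs : CG 0 (nums : Multiset Int)
        = (((PySem.Set.ofList nums).map (fun v => [v])).map
            (fun g => CG 0 (msOf (fun v => nums.count v) g))).prod := by
      rw [← cg_groups_prod 0 (fun v => nums.count v) ((PySem.Set.ofList nums).map (fun v => [v]))]
      · congr 1
        rw [List.map_map]
        have : ((PySem.Set.ofList nums).map
            ((msOf fun v => nums.count v) ∘ fun v => [v])).sum
            = msOf (fun v => nums.count v) (PySem.Set.ofList nums) := by
          rw [msOf]
          congr 1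
          apply List.map_congr_left
          intro v _
          simp [msOf]
        rw [this, msOf_ofList]
      · rw [List.pairwise_map]
        have hnd : List.Pairwise (· ≠ ·) (PySem.Set.ofList nums) :=
          PySem.Set.nodup_ofList nums
        apply List.Pairwise.imp ?_ hnd
        intro a b hab
        intro x hx y hy
        rw [List.mem_singleton.mp hx, List.mem_singleton.mp hy]
        intro habs
        exact hab (by have := abs_eq_zero.mp habs; omega)
    rw [hgs, List.map_map]
    have hprod : ∀ (L : List Int),
        ((L.map ((fun g => CG 0 (msOf (fun v => nums.count v) g)) ∘ fun v => [v])).prod : ℤ)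
        = (L.map ((fun c => c + 1) ∘ fun v => ((nums.count v : ℤ)))).prod := by
      intro L
      induction L with
      | nil => simp
      | cons x L ihL =>
        simp only [List.map_cons, List.prod_cons, Function.comp_apply]
        push_cast
        rw [← ihL]
        have : msOf (fun v => nums.count v) [x] = Multiset.replicate (nums.count x) x := by
          simp [msOf]
        rw [this, cg_rep_zero]
        push_cast
        ring
    rw [hprod]
  -- k > 0
  rw [if_neg h0]
  have hk : 0 < k := by omega
  dsimp only []
  rw [PySem.Dict.keys_counter]
  set vals := PySem.List.sorted (PySem.Set.ofList nums) (fun x => x) false with hvals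
  set G : Int → List Int := fun r => vals.filter (fun v => PySem.Int.mod v k == r) with hG
  set rs := PySem.Set.ofList (vals.map (fun v => PySem.Int.mod v k)) with hrs
  have hcf : ∀ v, ((PySem.Dict.counter nums).getD v 0).toNat = nums.count v := by
    intro v
    rw [PySem.Dict.getD_counter]
    exact Int.toNat_natCast _
  have hkeys : ((vals.foldl
      (fun g v => g.insert (PySem.Int.mod v k) ((g.getD (PySem.Int.mod v k) []) ++ [v]))
      PySem.Dict.empty) : PySem.Dict Int (List Int)).keys = rs := by
    rw [PySem.Dict.keys_foldl_insert_key vals (fun v => PySem.Int.mod v k) _ PySem.Dict.empty]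
    rw [show (PySem.Dict.empty : PySem.Dict Int (List Int)).keys = PySem.Set.empty from rfl]
    exact PySem.Set.update_empty _
  have hgvalues : ((vals.foldl
      (fun g v => g.insert (PySem.Int.mod v k) ((g.getD (PySem.Int.mod v k) []) ++ [v]))
      PySem.Dict.empty) : PySem.Dict Int (List Int)).values = rs.map G := by
    rw [PySem.Dict.values_eq_map_keys _ ?_ [], hkeys]
    · apply List.map_congr_left
      intro r _
      rw [group_getD (fun v => PySem.Int.mod v k) vals PySem.Dict.empty r]
      simp [hG]
    · rw [hkeys, hrs]
      exact PySem.Set.nodup_ofList _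
  rw [hgvalues, foldl_mul_int, one_mul, List.map_map]
  -- each group's fold computes CG of its multiset
  have hsortvals : List.Pairwise (· < ·) vals :=
    PySem.List.sorted_ofList_pairwise_lt nums
  have hgroup : ∀ r ∈ rs,
      ((fun gv => (List.foldl (stepB (PySem.Dict.counter nums) k) (1, 0, none) gv).1 +
          (List.foldl (stepB (PySem.Dict.counter nums) k) (1, 0, none) gv).2.1) ∘ G) r
        = ((CG k (msOf (fun v => nums.count v) (G r)) : ℕ) : ℤ) := by
    intro r _
    have hpair : List.Pairwise (· < ·) (([] : List Int) ++ G r) := by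
      rw [List.nil_append, hG]
      exact hsortvals.filter _
    have hdvd : ∀ a ∈ ([] : List Int) ++ G r, ∀ b ∈ ([] : List Int) ++ G r, k ∣ a - b := by
      rw [List.nil_append]
      intro a ha b hb
      rw [hG] at ha hb
      have hra : PySem.Int.mod a k = r := by simpa using List.of_mem_filter ha
      have hrb : PySem.Int.mod b k = r := by simpa using List.of_mem_filter hb
      exact dvd_sub_of_mod_eq hk (hra.trans hrb.symm)
    have h1 : (1 : ℤ) + 0 = ((CG k (msOf (fun v => nums.count v) ([] : List Int)) : ℕ) : ℤ) := by
      simp [msOf, CG, cgav_zero]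
    have hch := chainDP k hk (PySem.Dict.counter nums) (fun v => nums.count v) hcf
      (G r) [] 1 0 none hpair hdvd rfl h1 (by simpa using h1)
    simpa using hch
  rw [List.map_congr_left hgroup]
  -- product of the groups equals the full count
  have hcross : List.Pairwise (fun g₁ g₂ => ∀ x ∈ g₁, ∀ y ∈ g₂, |x - y| ≠ k) (rs.map G) := by
    rw [List.pairwise_map]
    have hnd : List.Pairwise (· ≠ ·) rs := by
      rw [hrs]
      exact PySem.Set.nodup_ofList _
    apply List.Pairwise.imp ?_ hnd
    intro r1 r2 hne x hx y hy habs
    apply hne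
    rw [hG] at hx hy
    have hr1 : PySem.Int.mod x k = r1 := by simpa using List.of_mem_filter hx
    have hr2 : PySem.Int.mod y k = r2 := by simpa using List.of_mem_filter hy
    rw [← hr1, ← hr2]
    apply mod_eq_of_dvd_sub hk
    rcases abs_cases (x - y) with ⟨h, _⟩ | ⟨h, _⟩
    · exact ⟨1, by omega⟩
    · exact ⟨-1, by omega⟩
  have hsum : (((rs.map G).map (msOf (fun v => nums.count v))).sum) = (nums : Multiset Int) := by
    rw [← msOf_flatten]
    have hflat : ((rs.map G).flatten).Perm vals := by
      rw [hrs, hG]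
      exact flatten_filter_perm (fun v => PySem.Int.mod v k) _ vals
        (PySem.Set.nodup_ofList _)
        (fun x hx => (PySem.Set.mem_ofList _ _).mpr (List.mem_map_of_mem hx))
    rw [msOf_perm _ hflat, hvals,
      msOf_perm _ (PySem.List.sorted_perm (PySem.Set.ofList nums) (fun x => x) false),
      msOf_ofList]
  have hfinal := cg_groups_prod k (fun v => nums.count v) (rs.map G) hcross
  rw [hsum] at hfinal
  have hcast2 : (rs.map (fun r => ((CG k (msOf (fun v => nums.count v) (G r)) : ℕ) : ℤ))).prod
      = ((((rs.map G).map (fun g => CG k (msOf (fun v => nums.count v) g))).prod : ℕ) : ℤ) := by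
    rw [Nat.cast_list_prod, List.map_map, List.map_map]
    rfl
  rw [hcast2, ← hfinal]

-- ===== VERDICT (by name: the statement is the Claim_ definition above) =====
theorem beautifulSubsets_spec : Claim_equal_beautifulSubsets := by
  intro nums k _
  unfold Spec_beautifulSubsets
  rw [A_eq, B_eq]
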